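-- pv_equiv track=rewrite | github.com/research-team/memristive-brain | scripts for anything/graph_plot_new.py | spikes
-- ===== SOURCE A (Python) =====
-- def spikes(chan):
--     LOW_LEVEL = 3
--     temp = 0
--     flag = True
--     for x in chan:
--         if (x > LOW_LEVEL and flag):
--             temp += 1
--             flag = False
--         if (x < LOW_LEVEL):
--             flag = True
--     return temp
-- ===== SOURCE B (Python) =====
-- def spikes(chan):
--     # rising-edge count over the filtered above/below states (exact 3 is transparent to A's flag)
--     states = [x > 3 for x in chan if x != 3]
--     count = 0
--     prev = False
--     for cur in states:
--         if cur and not prev: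
--             count += 1
--         prev = cur
--     return count
-- ===== Notes on version B (the rewrite author's own statement) =====
-- stated objective: alternative
-- what changed: Replaces the armed/disarmed flag state machine with a two-phase formulation: first filter the samples to a boolean above/below-threshold state list (dropping the transparent value 3), then count rising edges (starts of True-runs) in that list.
import Mathlib
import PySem

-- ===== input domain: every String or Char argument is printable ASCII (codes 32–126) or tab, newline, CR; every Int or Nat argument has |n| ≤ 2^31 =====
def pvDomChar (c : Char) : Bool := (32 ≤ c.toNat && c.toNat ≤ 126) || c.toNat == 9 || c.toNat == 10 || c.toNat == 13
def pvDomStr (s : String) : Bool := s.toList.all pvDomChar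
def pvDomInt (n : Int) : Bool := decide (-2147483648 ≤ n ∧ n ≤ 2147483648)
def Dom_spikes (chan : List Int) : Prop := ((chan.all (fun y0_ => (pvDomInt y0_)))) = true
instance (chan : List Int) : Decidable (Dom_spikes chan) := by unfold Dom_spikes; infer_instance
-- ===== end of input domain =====

-- B replaces A's armed/disarmed flag loop by filtering to a boolean state list and counting rising edges there (alternative formulation, same cost).


-- ===== PORT A =====
-- state (temp, flag); both ifs of the loop body in order
def spikesStep (s : Int × Bool) (x : Int) : Int × Bool :=
  let s1 := if x > 3 ∧ s.2 then (s.1 + 1, false) else s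
  if x < 3 then (s1.1, true) else s1

def spikes (chan : List Int) : Int :=
  (chan.foldl spikesStep (0, true)).1

-- ===== PORT B =====
-- state (count, prev) over the filtered boolean state list
def spikesAltStep (s : Int × Bool) (cur : Bool) : Int × Bool :=
  ((if cur ∧ s.2 = false then s.1 + 1 else s.1), cur)

def spikes_alt (chan : List Int) : Int :=
  let states := (chan.filter (fun x => x ≠ 3)).map (fun x => decide (x > 3))
  (states.foldl spikesAltStep (0, false)).1

-- ===== PRECONDITION & SPEC =====
def Spec_spikes (chan : List Int) (out : Int) : Prop := out = spikes_alt chan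
instance (chan : List Int) (out : Int) : Decidable (Spec_spikes chan out) := by unfold Spec_spikes; infer_instance

-- ===== CLAIM (what is proved, stated in full; the proofs are below) =====
def Claim_equal_spikes : Prop := ∀ (chan : List Int), Dom_spikes chan → Spec_spikes chan (spikes chan)

-- ===== LEMMAS AND PROOFS =====

-- Invariant: A's flag is the negation of B's prev; the counts stay equal step by step.
theorem spikes_loop_eq (chan : List Int) : ∀ (t : Int) (flag : Bool),
    (chan.foldl spikesStep (t, flag)).1 =
    (((chan.filter (fun x => x ≠ 3)).map (fun x => decide (x > 3))).foldl
        spikesAltStep (t, !flag)).1 := by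
  induction chan with
  | nil => intro t flag; simp [List.foldl]
  | cons x xs ih =>
    intro t flag
    by_cases h3 : x = 3
    · subst h3
      simp [List.foldl, spikesStep]
      simpa using ih t flag
    · by_cases hgt : x > 3
      · have hlt : ¬ x < 3 := by omega
        cases flag with
        | true =>
          simpa [List.filter, List.foldl, spikesStep, spikesAltStep, h3, hgt, hlt]
            using ih (t + 1) false
        | false =>
          simpa [List.filter, List.foldl, spikesStep, spikesAltStep, h3, hgt, hlt]
            using ih t false
      · have hlt : x < 3 := by omega
        have hlt' : ¬ x > 3 := by omega
        cases flag with
        | true =>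
          simpa [List.filter, List.foldl, spikesStep, spikesAltStep, h3, hgt, hlt, hlt']
            using ih t true
        | false =>
          simpa [List.filter, List.foldl, spikesStep, spikesAltStep, h3, hgt, hlt, hlt']
            using ih t true

-- ===== VERDICT (by name: the statement is the Claim_ definition above) =====
theorem spikes_spec : Claim_equal_spikes := by
  intro chan _
  unfold Spec_spikes spikes spikes_alt
  simpa using spikes_loop_eq chan 0 true
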